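-- pv_equiv track=rewrite | github.com/antarn88/NetworkAssistant | utilities/Validator.py | is_correct_any_ip_bin
-- ===== SOURCE A (Python) =====
-- def is_correct_any_ip_bin(ip_bin):
--     container = set()
--     if not len(ip_bin.split(".")) == 4:
--         return False
--     for i in ip_bin.split("."):
--         for x in i:
--             container.add(x)
--     for b in container:
--         if b != "0":
--             if b != "1":
--                 return False
--     return True
-- ===== SOURCE B (Python) =====
-- def is_correct_any_ip_bin(ip_bin):
--     # single-pass state machine: count fields separated by '.', reject on the
--     # first non-binary character, require exactly 4 fields at the end
--     nfields = 1
--     for c in ip_bin: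
--         if c == ".":
--             nfields += 1
--         elif c != "0" and c != "1":
--             return False
--     return nfields == 4
-- ===== Notes on version B (the rewrite author's own statement) =====
-- stated objective: simpler
-- what changed: Replaces A's split-into-parts, nested set-collecting loops and final set scan by one fused pass: a field counter incremented at each dot with an early reject on the first non-binary character, checking the counter equals 4 at the end.
import Mathlib
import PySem

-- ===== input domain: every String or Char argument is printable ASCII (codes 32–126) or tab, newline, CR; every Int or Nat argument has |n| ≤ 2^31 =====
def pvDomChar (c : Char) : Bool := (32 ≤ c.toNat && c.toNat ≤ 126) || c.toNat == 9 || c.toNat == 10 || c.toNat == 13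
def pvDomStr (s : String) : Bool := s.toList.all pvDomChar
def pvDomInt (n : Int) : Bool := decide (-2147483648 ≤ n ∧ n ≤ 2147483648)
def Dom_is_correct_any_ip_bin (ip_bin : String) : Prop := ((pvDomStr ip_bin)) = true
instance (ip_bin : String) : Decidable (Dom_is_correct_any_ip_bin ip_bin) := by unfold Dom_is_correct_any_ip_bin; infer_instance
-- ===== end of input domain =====

-- B replaces A's split-into-parts + set-collecting loops by one fused pass (field counter, early reject); same cost, simpler.


-- ===== PORT A =====
-- A: split on the dot, require 4 parts, pour every character of every part into a set,
-- then scan the set: any member that is not a binary digit → False.  (The final scan is an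
-- all-check, so Python's unspecified set iteration order cannot affect the result.)
def is_correct_any_ip_bin (ip_bin : String) : Bool :=
  let parts := PySem.Chars.splitOn ip_bin.toList ['.']
  if !(parts.length == 4) then false
  else
    let container : PySem.Set Char :=
      parts.foldl (fun c i => i.foldl (fun c x => PySem.Set.add c x) c) PySem.Set.empty
    container.all (fun b => if b != '0' then (if b != '1' then false else true) else true)

-- ===== PORT B =====
-- the for-loop with its early `return False` becomes structural recursion over the characters
def altScan : List Char → Nat → Bool
  | [], nfields => nfields == 4
  | c :: rest, nfields =>
    if c == '.' then altScan rest (nfields + 1)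
    else if c != '0' && c != '1' then false
    else altScan rest nfields

def is_correct_any_ip_bin_alt (ip_bin : String) : Bool :=
  altScan ip_bin.toList 1

-- ===== PRECONDITION & SPEC =====
def Spec_is_correct_any_ip_bin (ip_bin : String) (out : Bool) : Prop := out = is_correct_any_ip_bin_alt ip_bin
instance (ip_bin : String) (out : Bool) : Decidable (Spec_is_correct_any_ip_bin ip_bin out) := by unfold Spec_is_correct_any_ip_bin; infer_instance

-- ===== CLAIM (what is proved, stated in full; the proofs are below) =====
def Claim_equal_is_correct_any_ip_bin : Prop := ∀ (ip_bin : String), Dom_is_correct_any_ip_bin ip_bin → Spec_is_correct_any_ip_bin ip_bin (is_correct_any_ip_bin ip_bin)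

-- ===== LEMMAS AND PROOFS =====

-- characterization of B's state machine: all characters are binary digits or dots,
-- and the dot count plus the running field counter is 4.
theorem altScan_eq (cs : List Char) : ∀ (n : Nat),
    altScan cs n = (cs.all (fun c => c == '0' || c == '1' || c == '.')
                      && (cs.count '.' + n == 4)) := by
  induction cs with
  | nil => intro n; simp [altScan]
  | cons c rest ih =>
    intro n
    by_cases hdot : c = '.'
    · subst hdot
      simp [altScan, ih, List.count_cons]
      rw [show rest.count '.' + 1 + n = rest.count '.' + (n + 1) by omega]
    · by_cases h0 : c = '0'
      · subst h0; simp [altScan, ih, List.count_cons]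
      · by_cases h1 : c = '1'
        · subst h1; simp [altScan, ih, List.count_cons]
        · simp [altScan, hdot, h0, h1, bne, List.all_cons]

-- splitting on "." yields (number of dots)+1 parts, whose concatenation is the non-dot characters.
theorem splitOn_go_dot (fuel : Nat) : ∀ (l cur : List Char) (acc : List (List Char)),
    l.length ≤ fuel →
    (PySem.Chars.splitOn.go ['.'] fuel l cur acc).length = acc.length + l.count '.' + 1 ∧
    (PySem.Chars.splitOn.go ['.'] fuel l cur acc).flatten
      = acc.reverse.flatten ++ cur.reverse ++ l.filter (fun c => !(c == '.')) := by
  induction fuel with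
  | zero =>
    intro l cur acc h
    have : l = [] := List.length_eq_zero_iff.mp (Nat.le_zero.mp h)
    subst this; simp [PySem.Chars.splitOn.go]
  | succ fuel ih =>
    intro l cur acc h
    cases l with
    | nil => simp [PySem.Chars.splitOn.go]
    | cons c rest =>
      simp only [PySem.Chars.splitOn.go, List.isPrefixOf, List.isPrefixOf_nil_left, Bool.and_true]
      by_cases hc : c = '.'
      · subst hc
        simp only [beq_self_eq_true, if_pos, List.length_singleton, List.drop_succ_cons,
          List.drop_zero]
        obtain ⟨h1, h2⟩ := ih rest [] (cur.reverse :: acc) (by simpa using Nat.le_of_succ_le_succ h)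
        refine ⟨by rw [h1]; simp [List.count_cons]; omega, ?_⟩
        rw [h2]; simp
      · have hbc : ('.' == c) = false := by simp [beq_eq_false_iff_ne]; exact fun e => hc e.symm
        rw [hbc]
        simp only [Bool.false_eq_true, if_false]
        obtain ⟨h1, h2⟩ := ih rest (c :: cur) acc (by simpa using Nat.le_of_succ_le_succ h)
        refine ⟨by rw [h1]; simp [List.count_cons, hc], ?_⟩
        rw [h2]; simp [hc]

theorem splitOn_dot_length (cs : List Char) :
    (PySem.Chars.splitOn cs ['.']).length = cs.count '.' + 1 := by
  have := (splitOn_go_dot (cs.length + 1) cs [] [] (Nat.le_succ _)).1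
  simpa [PySem.Chars.splitOn] using this

theorem splitOn_dot_flatten (cs : List Char) :
    (PySem.Chars.splitOn cs ['.']).flatten = cs.filter (fun c => !(c == '.')) := by
  have := (splitOn_go_dot (cs.length + 1) cs [] [] (Nat.le_succ _)).2
  simpa [PySem.Chars.splitOn] using this

-- membership in the set built by A's nested collecting loops
theorem mem_container (parts : List (List Char)) :
    ∀ (c0 : PySem.Set Char) (y : Char),
    (y ∈ parts.foldl (fun c i => i.foldl (fun c x => PySem.Set.add c x) c) c0)
      ↔ y ∈ c0 ∨ y ∈ parts.flatten := by
  induction parts with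
  | nil => simp
  | cons p rest ih =>
    intro c0 y
    simp only [List.foldl_cons, List.flatten_cons, List.mem_append]
    rw [ih]
    have : (y ∈ p.foldl (fun c x => PySem.Set.add c x) c0) ↔ y ∈ c0 ∨ ∃ b ∈ p, y = b :=
      PySem.Set.mem_foldl_add (f := fun x => x) (l := p) (s := c0) (y := y)
    rw [this]
    constructor
    · rintro ((h | ⟨b, hb, rfl⟩) | h)
      · exact Or.inl h
      · exact Or.inr (Or.inl hb)
      · exact Or.inr (Or.inr h)
    · rintro (h | h | h)
      · exact Or.inl (Or.inl h)
      · exact Or.inl (Or.inr ⟨y, h, rfl⟩)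
      · exact Or.inr h

-- ===== VERDICT (by name: the statement is the Claim_ definition above) =====
theorem is_correct_any_ip_bin_spec : Claim_equal_is_correct_any_ip_bin := by
  intro ip_bin _
  unfold Spec_is_correct_any_ip_bin is_correct_any_ip_bin is_correct_any_ip_bin_alt
  set cs := ip_bin.toList with hcs
  rw [altScan_eq]
  by_cases hlen : (PySem.Chars.splitOn cs ['.']).length = 4
  · have hcnt : cs.count '.' + 1 = 4 := by
      have := splitOn_dot_length cs; omega
    simp only [hlen, hcnt, beq_self_eq_true, Bool.not_true, Bool.false_eq_true, if_false,
      Bool.and_true]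
    rw [Bool.eq_iff_iff]
    simp only [List.all_eq_true]
    constructor
    · intro h c hc
      by_cases hdot : c = '.'
      · simp [hdot]
      · have hmem : c ∈ (PySem.Chars.splitOn cs ['.']).foldl
            (fun c i => i.foldl (fun c x => PySem.Set.add c x) c) PySem.Set.empty := by
          rw [mem_container]
          refine Or.inr ?_
          rw [splitOn_dot_flatten]
          simp [List.mem_filter, hc, hdot]
        have := h c hmem
        by_cases h0 : c = '0' <;> by_cases h1 : c = '1' <;> simp_all [bne]
    · intro h c hc
      rw [mem_container, splitOn_dot_flatten] at hc
      rcases hc with hc | hc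
      · simp [PySem.Set.empty] at hc
      · rw [List.mem_filter] at hc
        have := h c hc.1
        have hdot : ¬ c = '.' := by simpa using hc.2
        by_cases h0 : c = '0' <;> by_cases h1 : c = '1' <;> simp_all [bne]
  · have hcnt : ((cs.count '.' + 1 : Nat) == 4) = false := by
      have := splitOn_dot_length cs; simp; omega
    simp [show ((PySem.Chars.splitOn cs ['.']).length == 4) = false by simpa using hlen, hcnt]
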